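-- pv_equiv track=rewrite | github.com/SAMKE-glitch/Daft_codes | sn1/codeJudge/magicalSequence.py | magicalSequence
-- ===== SOURCE A (Python) =====
-- def magicalSequence(N: int) -> int:
--     """
--     Find the number of magical sequences (consecutive integers) that sum to N.
--     Args:
--         N (int): The target sum for the sequence.
--     Returns:
--         int: the count of magical sequences
--     """
--     # To store the number of sequences
--     count = 0
--
--     # Try every possible length of the sequence (k)
--     # basically k is the number of integers or the length of sequences like lets say 2 = [a, b] 3 = [a,b,c]
--     k = 1
--
--     # while loop to check if the sum of the differences is less than the sum N
--     while k * (k - 1) // 2 < N: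
--
--         # remainder of the integers
--         remainder = N - (k * (k -1)) // 2
--         if remainder % k == 0:
--             count += 1
--         k += 1
--     return count
-- ===== SOURCE B (Python) =====
-- def magicalSequence(N: int) -> int:
--     """Count of consecutive-integer runs summing to N = number of odd divisors of N (via the largest odd factor)."""
--     if N <= 0:
--         return 0
--     M = N
--     while M % 2 == 0:
--         M //= 2
--     count = 0
--     d = 1
--     while d * d <= M:
--         if M % d == 0:
--             count += 2 if d * d < M else 1
--         d += 1
--     return count
-- ===== Notes on version B (the rewrite author's own statement) =====
-- stated objective: alternative
-- what changed: Replaces A's scan over all run lengths k with k(k-1)/2 < N by counting the odd divisors of N (extract the largest odd factor, then trial-divide up to its square root), using the classical identity that runs of consecutive integers summing to N correspond to odd divisors of N.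
import Mathlib
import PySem

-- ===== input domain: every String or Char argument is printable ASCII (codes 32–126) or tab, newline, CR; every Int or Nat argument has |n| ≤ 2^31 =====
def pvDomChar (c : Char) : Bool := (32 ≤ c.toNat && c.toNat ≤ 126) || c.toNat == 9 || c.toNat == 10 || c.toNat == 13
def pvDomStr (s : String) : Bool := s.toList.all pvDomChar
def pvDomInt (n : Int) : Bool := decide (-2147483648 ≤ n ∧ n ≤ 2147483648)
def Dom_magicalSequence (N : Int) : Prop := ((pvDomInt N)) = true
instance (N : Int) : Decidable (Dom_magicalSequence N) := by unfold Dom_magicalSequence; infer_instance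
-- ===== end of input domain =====

-- B replaces A's scan over run lengths by counting odd divisors of N (alternative algorithm, similar cost).

-- ===== PORT A =====
-- A's while loop over k; the loop only ever sees k ≥ 1 and, under the loop guard,
-- N - k(k-1)//2 > 0, so Nat arithmetic (with n = N.toNat) is exact for Python's //, %, -.
-- For N ≤ 0 the guard 0 < n is false at k = 1 exactly as Python's k*(k-1)//2 < N is.
def pvLoopA (n : Nat) (k : Nat) (count : Int) : Int :=
  if k * (k - 1) / 2 < n then
    pvLoopA n (k + 1) (if (n - k * (k - 1) / 2) % k = 0 then count + 1 else count)
  else count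
termination_by n + 1 - k
decreasing_by
  have hk : k - 1 ≤ k * (k - 1) / 2 := by
    rcases Nat.lt_or_ge k 2 with h | h
    · interval_cases k <;> simp
    · exact (Nat.le_div_iff_mul_le (by omega)).2 (by nlinarith)
  omega

def magicalSequence (N : Int) : Int := pvLoopA N.toNat 1 0

-- ===== PORT B =====
-- Source B's first while loop: strip even factors (only reached with M ≥ 1; the 0 < m
-- conjunct is a totality guard that is true on every reachable state).
def pvOddPart (m : Nat) : Nat :=
  if m % 2 = 0 ∧ 0 < m then pvOddPart (m / 2) else m
termination_by m
decreasing_by omega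

-- Source B's second while loop: trial division up to the square root.
def pvCountDiv (M : Nat) (d : Nat) (count : Int) : Int :=
  if d * d ≤ M then
    pvCountDiv M (d + 1)
      (if M % d = 0 then (if d * d < M then count + 2 else count + 1) else count)
  else count
termination_by M + 1 - d
decreasing_by
  have : d ≤ d * d := by
    rcases Nat.eq_zero_or_pos d with h | h
    · simp [h]
    · exact Nat.le_mul_of_pos_left d h
  omega

def magicalSequence_alt (N : Int) : Int :=
  if N ≤ 0 then 0 else pvCountDiv (pvOddPart N.toNat) 1 0

-- ===== PRECONDITION & SPEC =====
def Spec_magicalSequence (N : Int) (out : Int) : Prop := out = magicalSequence_alt N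
instance (N : Int) (out : Int) : Decidable (Spec_magicalSequence N out) := by unfold Spec_magicalSequence; infer_instance

-- ===== CLAIM (what is proved, stated in full; the proofs are below) =====
def Claim_equal_magicalSequence : Prop := ∀ (N : Int), Dom_magicalSequence N → Spec_magicalSequence N (magicalSequence N)

-- ===== LEMMAS AND PROOFS =====

-- A run length k is counted by A iff Valid n k.
abbrev pvValid (n k : Nat) : Prop := k * (k - 1) / 2 < n ∧ (n - k * (k - 1) / 2) % k = 0

theorem pv_tri_lb (k : Nat) : k - 1 ≤ k * (k - 1) / 2 := by
  rcases Nat.lt_or_ge k 2 with h | h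
  · interval_cases k <;> simp
  · exact (Nat.le_div_iff_mul_le (by omega)).2 (by nlinarith)

theorem pvLoopA_count (n : Nat) : ∀ k count, 1 ≤ k →
    pvLoopA n k count = count + (((Finset.Ico k (n + 1)).filter (fun j => pvValid n j)).card : Int) := by
  suffices H : ∀ m k count, n + 1 - k ≤ m → 1 ≤ k →
      pvLoopA n k count = count + (((Finset.Ico k (n + 1)).filter (fun j => pvValid n j)).card : Int) by
    intro k count hk; exact H (n + 1 - k) k count le_rfl hk
  intro m
  induction m with
  | zero =>
    intro k count hm hk
    rw [pvLoopA]
    have hkn : ¬ k * (k - 1) / 2 < n := by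
      intro h
      have := pv_tri_lb k
      omega
    rw [if_neg hkn]
    have : Finset.Ico k (n + 1) = ∅ := by
      apply Finset.Ico_eq_empty; omega
    simp [this]
  | succ m ih =>
    intro k count hm hk
    rw [pvLoopA]
    by_cases hg : k * (k - 1) / 2 < n
    · rw [if_pos hg]
      have hkn : k ≤ n := by have := pv_tri_lb k; omega
      have hsplit : Finset.Ico k (n + 1) = insert k (Finset.Ico (k + 1) (n + 1)) := by
        apply Finset.ext; intro j
        simp only [Finset.mem_Ico, Finset.mem_insert]
        omega
      have hnot : k ∉ Finset.Ico (k + 1) (n + 1) := by simp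
      have hvk : pvValid n k ↔ (n - k * (k - 1) / 2) % k = 0 := by
        unfold pvValid; exact ⟨fun h => h.2, fun h => ⟨hg, h⟩⟩
      rw [ih (k + 1) _ (by omega) (by omega), hsplit, Finset.filter_insert]
      by_cases hc : (n - k * (k - 1) / 2) % k = 0
      · rw [if_pos hc, if_pos (hvk.mpr hc),
            Finset.card_insert_of_notMem (fun h => hnot (Finset.mem_of_mem_filter k h))]
        push_cast; ring
      · rw [if_neg hc, if_neg (fun h => hc (hvk.mp h))]
    · rw [if_neg hg]
      have hempty : ((Finset.Ico k (n + 1)).filter (fun j => pvValid n j)) = ∅ := by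
        apply Finset.filter_eq_empty_iff.mpr
        intro j hj hv
        have hjk : k ≤ j := (Finset.mem_Ico.mp hj).1
        have : k * (k - 1) / 2 ≤ j * (j - 1) / 2 :=
          Nat.div_le_div_right (Nat.mul_le_mul hjk (by omega))
        exact hg (lt_of_le_of_lt this hv.1)
      simp [hempty]

theorem pvOddPart_odd (m : Nat) (hm : 0 < m) : Odd (pvOddPart m) ∧ pvOddPart m ∣ m := by
  induction m using Nat.strong_induction_on with
  | _ m ih =>
    rw [pvOddPart]
    by_cases h : m % 2 = 0 ∧ 0 < m
    · rw [if_pos h]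
      have h2 : m / 2 < m := Nat.div_lt_self hm (by omega)
      have hpos : 0 < m / 2 := by omega
      obtain ⟨ho, hdvd⟩ := ih (m / 2) h2 hpos
      exact ⟨ho, hdvd.trans (Nat.div_dvd_of_dvd (Nat.dvd_of_mod_eq_zero h.1))⟩
    · rw [if_neg h]
      exact ⟨Nat.odd_iff.mpr (by omega), dvd_rfl⟩

theorem pvOddPart_dvd (m d : Nat) (hm : 0 < m) (hd : Odd d) (h : d ∣ m) : d ∣ pvOddPart m := by
  induction m using Nat.strong_induction_on with
  | _ m ih =>
    rw [pvOddPart]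
    by_cases he : m % 2 = 0 ∧ 0 < m
    · rw [if_pos he]
      have h2 : m / 2 < m := Nat.div_lt_self hm (by omega)
      have hpos : 0 < m / 2 := by omega
      apply ih (m / 2) h2 hpos
      have hm2 : m = 2 * (m / 2) := by omega
      have hcop : Nat.Coprime d 2 := Nat.coprime_two_right.mpr hd
      exact (Nat.Coprime.dvd_of_dvd_mul_left hcop (hm2 ▸ h))
    · rw [if_neg he]; exact h

def pvSmall (M : Nat) : Finset Nat := M.divisors.filter (fun j => j * j < M)
def pvPerf (M : Nat) : Finset Nat := M.divisors.filter (fun j => j * j = M)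
def pvLarge (M : Nat) : Finset Nat := M.divisors.filter (fun j => M < j * j)

theorem pvCountDiv_loop (M : Nat) : ∀ m d count, Nat.sqrt M + 1 - d ≤ m → 1 ≤ d →
    pvCountDiv M d count = count +
      ∑ j ∈ (Finset.Ico d (Nat.sqrt M + 1)).filter (fun j => j ∣ M),
        (if j * j < M then (2 : Int) else 1) := by
  intro m
  induction m with
  | zero =>
    intro d count hm hd
    rw [pvCountDiv]
    have hg : ¬ d * d ≤ M := fun h => by have := Nat.le_sqrt.mpr h; omega
    rw [if_neg hg]
    have : Finset.Ico d (Nat.sqrt M + 1) = ∅ := Finset.Ico_eq_empty (by omega)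
    simp [this]
  | succ m ih =>
    intro d count hm hd
    rw [pvCountDiv]
    by_cases hg : d * d ≤ M
    · rw [if_pos hg]
      have hds : d ≤ Nat.sqrt M := Nat.le_sqrt.mpr hg
      have hsplit : Finset.Ico d (Nat.sqrt M + 1) = insert d (Finset.Ico (d + 1) (Nat.sqrt M + 1)) := by
        apply Finset.ext; intro j
        simp only [Finset.mem_Ico, Finset.mem_insert]
        omega
      have hnot : d ∉ (Finset.Ico (d + 1) (Nat.sqrt M + 1)).filter (fun j => j ∣ M) := by simp
      rw [ih (d + 1) _ (by omega) (by omega), hsplit, Finset.filter_insert]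
      have hdvd : d ∣ M ↔ M % d = 0 := Nat.dvd_iff_mod_eq_zero
      by_cases hc : M % d = 0
      · rw [if_pos hc, if_pos (hdvd.mpr hc), Finset.sum_insert hnot]
        by_cases hlt : d * d < M
        · rw [if_pos hlt, if_pos hlt]; ring
        · rw [if_neg hlt, if_neg hlt]; ring
      · rw [if_neg hc, if_neg (fun h => hc (hdvd.mp h))]
    · rw [if_neg hg]
      have hds : Nat.sqrt M < d := by
        by_contra h
        exact hg (Nat.le_sqrt.mp (by omega) |>.trans (le_refl M))
      have : Finset.Ico d (Nat.sqrt M + 1) = ∅ := Finset.Ico_eq_empty (by omega)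
      simp [this]

theorem pvLarge_card (M : Nat) (hM : 0 < M) : (pvLarge M).card = (pvSmall M).card := by
  apply Finset.card_bij (fun j _ => M / j)
  · intro j hj
    simp only [pvLarge, pvSmall, Finset.mem_filter, Nat.mem_divisors] at *
    obtain ⟨⟨hjd, hM0⟩, hbig⟩ := hj
    have hj0 : 0 < j := Nat.pos_of_dvd_of_pos hjd hM
    have hq : j * (M / j) = M := Nat.mul_div_cancel' hjd
    have hq0 : 0 < M / j := Nat.div_pos (Nat.le_of_dvd hM hjd) hj0
    refine ⟨⟨Nat.div_dvd_of_dvd hjd, hM0⟩, ?_⟩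
    have hqj : M / j < j := by nlinarith
    nlinarith
  · intro j1 h1 j2 h2 heq
    simp only [pvLarge, Finset.mem_filter, Nat.mem_divisors] at h1 h2
    have e1 : M / (M / j1) = j1 := Nat.div_div_self h1.1.1 (by omega)
    have e2 : M / (M / j2) = j2 := Nat.div_div_self h2.1.1 (by omega)
    rw [← e1, ← e2, heq]
  · intro q hq
    simp only [pvSmall, Finset.mem_filter, Nat.mem_divisors] at hq
    obtain ⟨⟨hqd, hM0⟩, hsm⟩ := hq
    have hq0 : 0 < q := Nat.pos_of_dvd_of_pos hqd hM
    have hj : q * (M / q) = M := Nat.mul_div_cancel' hqd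
    have hj0 : 0 < M / q := Nat.div_pos (Nat.le_of_dvd hM hqd) hq0
    refine ⟨M / q, ?_, Nat.div_div_self hqd (by omega)⟩
    simp only [pvLarge, Finset.mem_filter, Nat.mem_divisors]
    have hqlt : q < M / q := by nlinarith
    exact ⟨⟨Nat.div_dvd_of_dvd hqd, hM0⟩, by nlinarith⟩

theorem pvCountDiv_count (M : Nat) (hM : 0 < M) :
    pvCountDiv M 1 0 = (M.divisors.card : Int) := by
  rw [pvCountDiv_loop M (Nat.sqrt M + 1) 1 0 (by omega) le_rfl]
  have hT : (Finset.Ico 1 (Nat.sqrt M + 1)).filter (fun j => j ∣ M)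
      = M.divisors.filter (fun j => j * j ≤ M) := by
    apply Finset.ext; intro j
    simp only [Finset.mem_filter, Finset.mem_Ico, Nat.mem_divisors]
    constructor
    · rintro ⟨⟨h1, h2⟩, hd⟩
      exact ⟨⟨hd, by omega⟩, Nat.le_sqrt.mp (by omega) |>.trans (le_refl M)⟩
    · rintro ⟨⟨hd, hM0⟩, hsq⟩
      exact ⟨⟨Nat.pos_of_dvd_of_pos hd hM, by have := Nat.le_sqrt.mpr hsq; omega⟩, hd⟩
  rw [hT]
  have hsum : ∑ j ∈ M.divisors.filter (fun j => j * j ≤ M), (if j * j < M then (2 : Int) else 1)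
      = 2 * (pvSmall M).card + (pvPerf M).card := by
    rw [← Finset.sum_filter_add_sum_filter_not (M.divisors.filter (fun j => j * j ≤ M)) (fun j => j * j < M)]
    have e1 : (M.divisors.filter (fun j => j * j ≤ M)).filter (fun j => j * j < M) = pvSmall M := by
      apply Finset.ext; intro j
      simp only [pvSmall, Finset.mem_filter]
      constructor
      · rintro ⟨⟨h1, _⟩, h3⟩; exact ⟨h1, h3⟩
      · rintro ⟨h1, h2⟩; exact ⟨⟨h1, by omega⟩, h2⟩
    have e2 : (M.divisors.filter (fun j => j * j ≤ M)).filter (fun j => ¬ j * j < M) = pvPerf M := by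
      apply Finset.ext; intro j
      simp only [pvPerf, Finset.mem_filter]
      constructor
      · rintro ⟨⟨h1, h2⟩, h3⟩; exact ⟨h1, by omega⟩
      · rintro ⟨h1, h2⟩; exact ⟨⟨h1, by omega⟩, by omega⟩
    rw [e1, e2]
    have a1 : (∑ x ∈ pvSmall M, if x * x < M then (2 : Int) else 1) = ∑ x ∈ pvSmall M, (2 : Int) :=
      Finset.sum_congr rfl (fun j hj => if_pos (Finset.mem_filter.mp hj).2)
    have a2 : (∑ x ∈ pvPerf M, if x * x < M then (2 : Int) else 1) = ∑ x ∈ pvPerf M, (1 : Int) :=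
      Finset.sum_congr rfl (fun j hj => if_neg (by have := (Finset.mem_filter.mp hj).2; omega))
    rw [a1, a2]
    simp [mul_comm]
  rw [hsum]
  have hcard : M.divisors.card = 2 * (pvSmall M).card + (pvPerf M).card := by
    have hA := Finset.card_filter_add_card_filter_not (s := M.divisors) (p := fun j => j * j < M)
    have hB := Finset.card_filter_add_card_filter_not
      (s := M.divisors.filter (fun j => ¬ j * j < M)) (p := fun j => j * j = M)
    have p1 : (M.divisors.filter (fun j => ¬ j * j < M)).filter (fun j => j * j = M) = pvPerf M := by
      apply Finset.ext; intro j
      simp only [pvPerf, Finset.mem_filter]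
      constructor
      · rintro ⟨⟨h1, h2⟩, h3⟩; exact ⟨h1, h3⟩
      · rintro ⟨h1, h3⟩; exact ⟨⟨h1, by omega⟩, h3⟩
    have p2 : (M.divisors.filter (fun j => ¬ j * j < M)).filter (fun j => ¬ j * j = M) = pvLarge M := by
      apply Finset.ext; intro j
      simp only [pvLarge, Finset.mem_filter]
      constructor
      · rintro ⟨⟨h1, h2⟩, h3⟩; exact ⟨h1, by omega⟩
      · rintro ⟨h1, h3⟩; exact ⟨⟨h1, by omega⟩, by omega⟩
    rw [p1, p2] at hB
    have hS : (M.divisors.filter (fun j => j * j < M)).card = (pvSmall M).card := rfl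
    have hL := pvLarge_card M hM
    omega
  rw [hcard]; push_cast; ring

theorem pv_two_tri (k : Nat) : 2 * (k * (k - 1) / 2) = k * (k - 1) := by
  have h : 2 ∣ k * (k - 1) := by
    rcases Nat.even_or_odd k with h | h
    · exact Dvd.dvd.mul_right (even_iff_two_dvd.mp h) _
    · exact Dvd.dvd.mul_left (even_iff_two_dvd.mp (by simpa using Nat.Odd.sub_odd h odd_one)) _
  exact Nat.mul_div_cancel' h

theorem pvValid_iff (n k : Nat) (hk : 1 ≤ k) :
    pvValid n k ↔ ∃ m, k * m = 2 * n ∧ k < m ∧ (k + m) % 2 = 1 := by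
  have h2T : 2 * (k * (k - 1) / 2) = k * (k - 1) := pv_two_tri k
  constructor
  · rintro ⟨hlt, hmod⟩
    obtain ⟨a, haeq⟩ := Nat.dvd_of_mod_eq_zero hmod
    have ha1 : 1 ≤ a := by
      rcases Nat.eq_zero_or_pos a with h | h
      · exfalso; rw [h, Nat.mul_zero] at haeq; omega
      · exact h
    refine ⟨2 * a + k - 1, ?_, by omega, by omega⟩
    have hsplit : 2 * a + k - 1 = 2 * a + (k - 1) := by omega
    calc k * (2 * a + k - 1) = k * (2 * a) + k * (k - 1) := by rw [hsplit, Nat.mul_add]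
      _ = 2 * (k * a) + 2 * (k * (k - 1) / 2) := by rw [h2T]; ring
      _ = 2 * n := by omega
  · rintro ⟨m, hkm, hlt, hpar⟩
    have hTn : k * (k - 1) < 2 * n := by
      calc k * (k - 1) < k * m := by
            have h1 : k - 1 < m := by omega
            exact Nat.mul_lt_mul_of_le_of_lt (le_refl k) h1 (by omega)
        _ = 2 * n := hkm
    constructor
    · omega
    · obtain ⟨a, haa⟩ := (Nat.dvd_of_mod_eq_zero (show (m - k + 1) % 2 = 0 by omega))
      have hsub : (m - (k - 1)) + (k - 1) = m := Nat.sub_add_cancel (by omega)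
      have hdistr : k * (m - (k - 1)) + k * (k - 1) = k * m := by
        rw [← Nat.mul_add, hsub]
      have hmk : m - (k - 1) = 2 * a := by omega
      have key : k * (2 * a) + k * (k - 1) = 2 * n := by rw [← hmk, hdistr, hkm]
      have key2 : 2 * (k * a) + 2 * (k * (k - 1) / 2) = 2 * n := by
        rw [h2T]; calc 2 * (k * a) + k * (k - 1) = k * (2 * a) + k * (k - 1) := by ring
          _ = 2 * n := key
      have : n - k * (k - 1) / 2 = k * a := by omega
      rw [this]
      simp [Nat.mul_mod_right]

theorem pvValid_pair (n k : Nat) (hk : 1 ≤ k) (hv : pvValid n k) :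
    k * (2 * n / k) = 2 * n ∧ k < 2 * n / k ∧ (k + 2 * n / k) % 2 = 1 := by
  obtain ⟨m, hkm, hlt, hpar⟩ := (pvValid_iff n k hk).mp hv
  have hm : 2 * n / k = m := by rw [← hkm]; exact Nat.mul_div_cancel_left m (by omega)
  rw [hm]; exact ⟨hkm, hlt, hpar⟩

theorem pvBij (n : Nat) (hn : 0 < n) :
    ((Finset.Ico 1 (n + 1)).filter (fun j => pvValid n j)).card = (pvOddPart n).divisors.card := by
  obtain ⟨hModd, hMdvd⟩ := pvOddPart_odd n hn
  have hM0 : 0 < pvOddPart n := Nat.pos_of_dvd_of_pos hMdvd hn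
  refine Finset.card_bij' (fun k _ => if k % 2 = 1 then k else 2 * n / k)
    (fun d _ => min d (2 * n / d)) ?hi ?hj ?li ?ri
  -- hi : image of a valid k is an odd divisor
  case hi =>
    intro k hk
    beta_reduce
    obtain ⟨hko, hv⟩ := Finset.mem_filter.mp hk
    have hk1 : 1 ≤ k := (Finset.mem_Ico.mp hko).1
    obtain ⟨hkm, hlt, hpar⟩ := pvValid_pair n k hk1 hv
    rw [Nat.mem_divisors]
    refine ⟨?_, by omega⟩
    by_cases hodd : k % 2 = 1
    · rw [if_pos hodd]
      apply pvOddPart_dvd n k hn (Nat.odd_iff.mpr hodd)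
      exact (Nat.Coprime.dvd_of_dvd_mul_left
        (Nat.coprime_two_right.mpr (Nat.odd_iff.mpr hodd)) ⟨2 * n / k, hkm.symm⟩)
    · rw [if_neg hodd]
      have hmodd : Odd (2 * n / k) := Nat.odd_iff.mpr (by omega)
      apply pvOddPart_dvd n _ hn hmodd
      exact (Nat.Coprime.dvd_of_dvd_mul_left
        (Nat.coprime_two_right.mpr hmodd) ⟨k, by rw [Nat.mul_comm] at hkm; omega⟩)
  -- hj : an odd divisor maps back to a valid k
  case hj =>
    intro d hd
    beta_reduce
    obtain ⟨hdM, _⟩ := Nat.mem_divisors.mp hd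
    have hdn : d ∣ n := hdM.trans hMdvd
    have hd1 : 1 ≤ d := Nat.pos_of_dvd_of_pos hdn hn
    have hdodd : Odd d := by
      rcases Nat.even_or_odd d with h | h
      · exfalso
        exact (Nat.odd_iff.mp hModd ▸ (by
          have : 2 ∣ pvOddPart n := dvd_trans (even_iff_two_dvd.mp h) hdM
          omega : ¬ (pvOddPart n % 2 = 1))) rfl
      · exact h
    have hde : d * (2 * n / d) = 2 * n := Nat.mul_div_cancel' (hdn.mul_left 2)
    have heeven : 2 * n / d = 2 * (n / d) := Nat.mul_div_assoc 2 hdn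
    have hnd1 : 1 ≤ n / d := Nat.div_pos (Nat.le_of_dvd hn hdn) hd1
    have hne : d ≠ 2 * n / d := by
      intro h
      have := Nat.odd_iff.mp hdodd
      omega
    rw [Finset.mem_filter, Finset.mem_Ico]
    have hmain : ∀ k m : Nat, k * m = 2 * n → k < m → (k + m) % 2 = 1 →
        (1 ≤ k ∧ k < n + 1) ∧ pvValid n k := by
      intro k m hkm hlt hpar
      have hk1 : 1 ≤ k := by
        rcases Nat.eq_zero_or_pos k with h | h
        · exfalso; rw [h, Nat.zero_mul] at hkm; omega
        · exact h
      have hkn : k ≤ n := by nlinarith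
      exact ⟨⟨hk1, by omega⟩, (pvValid_iff n k hk1).mpr ⟨m, hkm, hlt, hpar⟩⟩
    rcases Nat.lt_or_ge d (2 * n / d) with hlt | hge
    · rw [Nat.min_eq_left (le_of_lt hlt)]
      exact hmain d (2 * n / d) hde hlt (by have := Nat.odd_iff.mp hdodd; omega)
    · have hlt2 : 2 * n / d < d := by omega
      rw [Nat.min_eq_right (le_of_lt hlt2)]
      exact hmain (2 * n / d) d (by rw [Nat.mul_comm]; exact hde) hlt2
        (by have := Nat.odd_iff.mp hdodd; omega)
  -- left inverse
  case li =>
    intro k hk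
    beta_reduce
    obtain ⟨hko, hv⟩ := Finset.mem_filter.mp hk
    have hk1 : 1 ≤ k := (Finset.mem_Ico.mp hko).1
    obtain ⟨hkm, hlt, hpar⟩ := pvValid_pair n k hk1 hv
    by_cases hodd : k % 2 = 1
    · rw [if_pos hodd]
      exact Nat.min_eq_left (le_of_lt hlt)
    · rw [if_neg hodd]
      have hb : 2 * n / (2 * n / k) = k := by
        have h0 : 0 < 2 * n / k := by omega
        have h1 := Nat.mul_div_cancel k h0
        rw [hkm] at h1
        exact h1
      rw [hb]
      exact Nat.min_eq_right (le_of_lt hlt)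
  -- right inverse
  case ri =>
    intro d hd
    beta_reduce
    obtain ⟨hdM, _⟩ := Nat.mem_divisors.mp hd
    have hdn : d ∣ n := hdM.trans hMdvd
    have hd1 : 1 ≤ d := Nat.pos_of_dvd_of_pos hdn hn
    have hdodd : d % 2 = 1 := by
      rcases Nat.even_or_odd d with h | h
      · exfalso
        have h2 : 2 ∣ pvOddPart n := dvd_trans (even_iff_two_dvd.mp h) hdM
        have := Nat.odd_iff.mp hModd
        omega
      · exact Nat.odd_iff.mp h
    have hde : d * (2 * n / d) = 2 * n := Nat.mul_div_cancel' (hdn.mul_left 2)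
    have heeven : 2 * n / d = 2 * (n / d) := Nat.mul_div_assoc 2 hdn
    rcases Nat.lt_or_ge d (2 * n / d) with hlt | hge
    · rw [Nat.min_eq_left (le_of_lt hlt), if_pos hdodd]
    · have hnd1 : 1 ≤ n / d := Nat.div_pos (Nat.le_of_dvd hn hdn) hd1
      have hlt2 : 2 * n / d < d := by omega
      rw [Nat.min_eq_right (le_of_lt hlt2), if_neg (by omega)]
      have h0 : 0 < 2 * n / d := by omega
      have h1 := Nat.mul_div_cancel d h0
      rw [hde] at h1
      exact h1

-- ===== VERDICT (by name: the statement is the Claim_ definition above) =====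
theorem magicalSequence_spec : Claim_equal_magicalSequence := by
  intro N _
  unfold Spec_magicalSequence magicalSequence magicalSequence_alt
  by_cases hN : N ≤ 0
  · have : N.toNat = 0 := by omega
    rw [this, if_pos hN, pvLoopA]
    simp
  · rw [if_neg hN]
    have hn : 0 < N.toNat := by omega
    rw [pvLoopA_count N.toNat 1 0 le_rfl,
        pvCountDiv_count (pvOddPart N.toNat)
          (Nat.pos_of_dvd_of_pos (pvOddPart_odd N.toNat hn).2 hn),
        pvBij N.toNat hn]
    simp
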